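-- pv_equiv track=rewrite | github.com/sunnyhxu/Matroid10 | python/neuro_symbolic/canonicalize.py | _refine_partition
-- ===== SOURCE A (Python) =====
-- from collections import Counter
-- from typing import Dict, Iterable, List, Sequence, Tuple
--
-- def _base_color(mask: int, partition: Sequence[Tuple[int, ...]]) -> Tuple[int, ...]:
--     return tuple(sum(1 for element in cell if (mask >> element) & 1) for cell in partition)
--
-- def _refine_partition(n: int, bases: Sequence[int], partition: Sequence[Tuple[int, ...]]) -> Tuple[Tuple[int, ...], ...]:
--     current = tuple(tuple(cell) for cell in partition)
--
--     while True:
--         base_colors = {mask: _base_color(mask, current) for mask in bases}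
--         refined: List[Tuple[int, ...]] = []
--         changed = False
--
--         for cell in current:
--             if len(cell) == 1:
--                 refined.append(tuple(cell))
--                 continue
--
--             grouped: Dict[Tuple[Tuple[Tuple[int, ...], int], ...], List[int]] = {}
--             for element in cell:
--                 incident_histogram = Counter(
--                     base_colors[mask] for mask in bases if (mask >> element) & 1
--                 )
--                 signature = tuple(sorted(incident_histogram.items()))
--                 grouped.setdefault(signature, []).append(element)
--
--             if len(grouped) == 1:
--                 refined.append(tuple(sorted(cell)))
--                 continue
--
--             changed = True
--             for signature in sorted(grouped):
--                 refined.append(tuple(sorted(grouped[signature])))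
--
--         next_partition = tuple(refined)
--         if not changed or next_partition == current:
--             return next_partition
--         current = next_partition
-- ===== SOURCE B (Python) =====
-- from collections import Counter
-- from typing import List, Sequence, Tuple
--
--
-- def _base_color(mask: int, partition: Sequence[Tuple[int, ...]]) -> Tuple[int, ...]:
--     return tuple(sum(1 for element in cell if (mask >> element) & 1) for cell in partition)
--
--
-- def _signature(element, bases, base_colors):
--     histogram = Counter(base_colors[mask] for mask in bases if (mask >> element) & 1)
--     return tuple(sorted(histogram.items()))
--
--
-- def _refine_partition(n: int, bases: Sequence[int], partition: Sequence[Tuple[int, ...]]) -> Tuple[Tuple[int, ...], ...]: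
--     current = tuple(tuple(cell) for cell in partition)
--
--     while True:
--         base_colors = {mask: _base_color(mask, current) for mask in bases}
--
--         # one flat sorted pass: every element tagged with (cell index, signature)
--         triples = sorted(
--             (index, _signature(element, bases, base_colors), element)
--             for index, cell in enumerate(current)
--             for element in cell
--         )
--
--         # linear group-by scan over the sorted triples
--         refined: List[Tuple[int, ...]] = []
--         group: List[int] = []
--         previous = None
--         for index, signature, element in triples:
--             if (index, signature) == previous:
--                 group.append(element)
--             else:
--                 if group:
--                     refined.append(tuple(group))
--                 group = [element]
--                 previous = (index, signature)
--         if group: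
--             refined.append(tuple(group))
--
--         next_partition = tuple(refined)
--         if next_partition == current:
--             return next_partition
--         current = next_partition
-- ===== Notes on version B (the rewrite author's own statement) =====
-- stated objective: alternative
-- what changed: A refines cell by cell with a per-cell grouping dict (setdefault/append), singleton and single-group special cases and a `changed` flag; B instead sorts ONE flat list of (cell index, signature, element) triples per pass, rebuilds the whole partition by a linear group-by scan over that sorted list, and terminates by pure fixpoint iteration (next == current) with no `changed` flag at all.
import Mathlib
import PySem

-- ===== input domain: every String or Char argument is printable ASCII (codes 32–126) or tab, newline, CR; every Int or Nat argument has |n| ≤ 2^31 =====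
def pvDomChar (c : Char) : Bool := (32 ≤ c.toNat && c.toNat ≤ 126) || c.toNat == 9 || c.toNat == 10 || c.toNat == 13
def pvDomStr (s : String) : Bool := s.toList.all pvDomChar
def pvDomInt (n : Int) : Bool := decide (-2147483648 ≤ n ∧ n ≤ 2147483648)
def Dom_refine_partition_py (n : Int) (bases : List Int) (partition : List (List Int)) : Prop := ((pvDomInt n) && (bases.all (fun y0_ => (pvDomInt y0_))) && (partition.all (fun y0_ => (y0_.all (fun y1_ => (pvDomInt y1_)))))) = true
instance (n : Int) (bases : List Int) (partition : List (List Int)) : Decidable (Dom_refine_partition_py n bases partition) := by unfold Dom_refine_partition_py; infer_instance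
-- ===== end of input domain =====

-- B removes A's per-cell grouping dict, its singleton/uniform special cases and its `changed` flag:
-- each pass it sorts ONE flat list of (cell index, signature, element) triples, rebuilds the
-- partition by a linear group-by scan over that sorted list, and iterates to a fixpoint
-- (next == current); objective: alternative (same cost, genuinely different pass structure).

-- ===== PORT A =====
-- Helpers shared by both ports: these lines are identical in both Python sources
-- ((mask >> element) & 1, _base_color, the base_colors dict comprehension, and the
-- Counter/sorted signature of one element).

-- (mask >> e) & 1.  The shift is capped at 64: exact on the stated domain |mask| ≤ 2^31 < 2^63,
-- where every shift by ≥ 64 bits already yields 0 (mask ≥ 0) or -1 (mask < 0).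
def pyBit (mask : Int) (e : Int) : Int := PySem.Int.band (mask >>> (min e.toNat 64)) 1

-- _base_color(mask, partition): per-cell count of elements whose bit is set in mask
def pyBaseColor (mask : Int) (current : List (List Int)) : List Int :=
  current.map (fun cell => (cell.map (fun e => if pyBit mask e == 1 then (1 : Int) else 0)).sum)

-- base_colors = {mask: _base_color(mask, current) for mask in bases}
def pyBaseColors (bases : List Int) (current : List (List Int)) : PySem.Dict Int (List Int) :=
  bases.foldl (fun d m => d.insert m (pyBaseColor m current)) PySem.Dict.empty

-- order-preserving List Int encoding of a Python (color-tuple, count) pair, used as sort key: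
-- each color is emitted as a 1-tagged block, the count as a 0-tagged terminator block, so the
-- encoding is injective and, on the histograms that occur (colors ≥ 0, counts ≥ 1), ordered
-- exactly like Python's tuple comparison (prefix first).
def pyEncPair (p : List Int × Int) : List Int := p.1.flatMap (fun c => [1, c]) ++ [0, p.2]

-- order-preserving List Int encoding of a signature (tuple of such pairs), same block structure
def pyEncSig (s : List (List Int × Int)) : List Int := s.flatMap pyEncPair

-- tuple(sorted(Counter(base_colors[mask] for mask in bases if (mask >> element) & 1).items()))
def pySignature (bases : List Int) (colors : PySem.Dict Int (List Int)) (e : Int) : List (List Int × Int) :=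
  PySem.List.sorted
    (PySem.Dict.counter ((bases.filter (fun m => pyBit m e == 1)).map (fun m => colors.getD m []))).items
    pyEncPair false

-- one pass of A's while-loop body: (refined, changed)
def stepA (bases : List Int) (current : List (List Int)) : List (List Int) × Bool :=
  let colors := pyBaseColors bases current
  current.foldl
    (fun acc cell =>
      if cell.length == 1 then (acc.1 ++ [cell], acc.2)
      else
        let grouped := cell.foldl
          (fun g e => g.modify (pySignature bases colors e) [] (fun l => l ++ [e]))
          PySem.Dict.empty
        if grouped.size == 1 then (acc.1 ++ [PySem.List.sorted cell (fun x => x) false], acc.2)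
        else
          (acc.1 ++ (PySem.List.sorted grouped.keys pyEncSig false).map
              (fun k => PySem.List.sorted (grouped.getD k []) (fun x => x) false),
           true))
    ([], false)

-- the while True loop; fuel is a termination device only (each pass that does not already halt
-- strictly refines the partition, so total elements + cells + 3 passes always suffice)
def loopA (fuel : Nat) (bases : List Int) (current : List (List Int)) : List (List Int) :=
  match fuel with
  | 0 => current
  | fuel + 1 =>
    let r := stepA bases current
    if !r.2 || r.1 == current then r.1 else loopA fuel bases r.1

def refine_partition_py (n : Int) (bases : List Int) (partition : List (List Int)) : List (List Int) :=
  loopA ((partition.map List.length).sum + partition.length + 3) bases partition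

-- ===== PORT B =====
-- sort key of one (index, signature, element) triple: Python compares the tuples themselves;
-- the encoding is order-equivalent on the occurring data (-2 sits below every sig block tag)
def pyTripleKey (t : Int × List (List Int × Int) × Int) : List Int :=
  t.1 :: (pyEncSig t.2.1 ++ [-2, t.2.2])

-- the body of B's group-by scan over the sorted triples (state: refined, group, previous)
def pyScanStep (st : List (List Int) × List Int × Option (Int × List (List Int × Int)))
    (t : Int × List (List Int × Int) × Int) :
    List (List Int) × List Int × Option (Int × List (List Int × Int)) :=
  if st.2.2 == some (t.1, t.2.1) then (st.1, st.2.1 ++ [t.2.2], st.2.2)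
  else ((if st.2.1.isEmpty then st.1 else st.1 ++ [st.2.1]), [t.2.2], some (t.1, t.2.1))

-- one pass of B's loop body: flat sorted triples, then a linear group-by scan
def stepB (bases : List Int) (current : List (List Int)) : List (List Int) :=
  let colors := pyBaseColors bases current
  let triples := PySem.List.sorted
    ((PySem.List.enumerate current 0).flatMap
      (fun ic => ic.2.map (fun e => (ic.1, pySignature bases colors e, e))))
    pyTripleKey false
  let st := triples.foldl pyScanStep ([], [], none)
  if st.2.1.isEmpty then st.1 else st.1 ++ [st.2.1]

-- B's while True loop: pure fixpoint iteration (same fuel device as A's port)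
def loopB (fuel : Nat) (bases : List Int) (current : List (List Int)) : List (List Int) :=
  match fuel with
  | 0 => current
  | fuel + 1 =>
    let nxt := stepB bases current
    if nxt == current then nxt else loopB fuel bases nxt

def refine_partition_py_alt (n : Int) (bases : List Int) (partition : List (List Int)) : List (List Int) :=
  loopB ((partition.map List.length).sum + partition.length + 3) bases partition

-- ===== PRECONDITION & SPEC =====
-- Python raises ValueError ("negative shift count") in `mask >> element` for a negative element
-- (shifts happen as soon as bases is nonempty); Pre_ excludes exactly those inputs.
def Pre_refine_partition_py (n : Int) (bases : List Int) (partition : List (List Int)) : Prop :=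
  bases = [] ∨ ∀ cell ∈ partition, ∀ e ∈ cell, 0 ≤ e

instance (n : Int) (bases : List Int) (partition : List (List Int)) : Decidable (Pre_refine_partition_py n bases partition) := by unfold Pre_refine_partition_py; infer_instance

def pvWitness_refine_partition_py : Int × List Int × List (List Int) := (3, [3, 5, 6], [[0, 1, 2]])

def Spec_refine_partition_py (n : Int) (bases : List Int) (partition : List (List Int)) (out : List (List Int)) : Prop := out = refine_partition_py_alt n bases partition
instance (n : Int) (bases : List Int) (partition : List (List Int)) (out : List (List Int)) : Decidable (Spec_refine_partition_py n bases partition out) := by unfold Spec_refine_partition_py; infer_instance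

-- ===== CLAIM (what is proved, stated in full; the proofs are below) =====
def Claim_equal_refine_partition_py : Prop := ∀ (n : Int) (bases : List Int) (partition : List (List Int)), Dom_refine_partition_py n bases partition → Pre_refine_partition_py n bases partition → Spec_refine_partition_py n bases partition (refine_partition_py n bases partition)

-- ===== LEMMAS AND PROOFS =====

-- ---- the sig-encoding block structure: a flat list of 2-blocks whose tag is 0 or 1 ----
inductive PvBlocky : List Int → Prop
  | nil : PvBlocky []
  | cons (t v : Int) {r : List Int} (ht : t = 0 ∨ t = 1) (hr : PvBlocky r) : PvBlocky (t :: v :: r)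

theorem pvBlocky_flatMap_tag (cs : List Int) (l : List Int) (hl : PvBlocky l) :
    PvBlocky (cs.flatMap (fun c => [1, c]) ++ l) := by
  induction cs with
  | nil => simpa using hl
  | cons c cs ih => exact PvBlocky.cons 1 c (Or.inr rfl) ih

theorem pvBlocky_encPair_append (p : List Int × Int) (l : List Int) (hl : PvBlocky l) :
    PvBlocky (pyEncPair p ++ l) := by
  unfold pyEncPair
  rw [List.append_assoc]
  exact pvBlocky_flatMap_tag _ _ (PvBlocky.cons 0 p.2 (Or.inl rfl) hl)

theorem pvBlocky_encSig (s : List (List Int × Int)) : PvBlocky (pyEncSig s) := by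
  induction s with
  | nil => exact PvBlocky.nil
  | cons p r ih => exact pvBlocky_encPair_append p (pyEncSig r) ih

-- two blocky prefixes before a -2 separator coincide
theorem pvBlocky_sep_inj : ∀ (l1 : List Int), PvBlocky l1 → ∀ (l2 : List Int), PvBlocky l2 →
    ∀ (w1 w2 : List Int), l1 ++ (-2 :: w1) = l2 ++ (-2 :: w2) → l1 = l2 ∧ w1 = w2 := by
  intro l1 h1
  induction h1 with
  | nil =>
    intro l2 h2 w1 w2 he
    cases h2 with
    | nil => simpa using he
    | cons t v ht hr => simp only [List.nil_append, List.cons_append, List.cons.injEq] at he; exfalso; obtain ⟨h, -⟩ := he; omega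
  | cons t v ht hr ih =>
    intro l2 h2 w1 w2 he
    cases h2 with
    | nil => simp only [List.nil_append, List.cons_append, List.cons.injEq] at he; exfalso; obtain ⟨h, -⟩ := he; omega
    | cons t' v' ht' hr' =>
      simp only [List.cons_append, List.cons.injEq] at he
      obtain ⟨h₁, h₂, h₃⟩ := he
      obtain ⟨hl, hw⟩ := ih _ hr' _ _ h₃
      exact ⟨by simp [h₁, h₂, hl], hw⟩

-- the pair encoding is prefix-injective
theorem pvEncPair_prefix_inj : ∀ (c1 : List Int) (n1 : Int) (c2 : List Int) (n2 : Int)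
    (u v : List Int), (c1.flatMap (fun c => [1, c]) ++ [0, n1]) ++ u
      = (c2.flatMap (fun c => [1, c]) ++ [0, n2]) ++ v →
    c1 = c2 ∧ n1 = n2 ∧ u = v := by
  intro c1
  induction c1 with
  | nil =>
    intro n1 c2 n2 u v h
    cases c2 with
    | nil => simpa using h
    | cons c cs => simp at h
  | cons c cs ih =>
    intro n1 c2 n2 u v h
    cases c2 with
    | nil => simp at h
    | cons c' cs' =>
      simp only [List.flatMap_cons, List.append_assoc, List.cons_append, List.nil_append,
        List.cons.injEq] at h
      obtain ⟨-, hcc, h₂⟩ := h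
      have := ih n1 cs' n2 u v (by simpa [List.append_assoc] using h₂)
      exact ⟨by simp [hcc, this.1], this.2.1, this.2.2⟩

theorem pvEncSig_inj : ∀ (s1 s2 : List (List Int × Int)), pyEncSig s1 = pyEncSig s2 → s1 = s2 := by
  intro s1
  induction s1 with
  | nil =>
    intro s2 h
    cases s2 with
    | nil => rfl
    | cons p r => unfold pyEncSig pyEncPair at h; simp at h
  | cons p r ih =>
    intro s2 h
    cases s2 with
    | nil => unfold pyEncSig pyEncPair at h; simp at h
    | cons p' r' =>
      unfold pyEncSig at h
      simp only [List.flatMap_cons] at h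
      unfold pyEncPair at h
      obtain ⟨hc, hn, hr⟩ := pvEncPair_prefix_inj p.1 p.2 p'.1 p'.2 _ _ h
      have : p = p' := Prod.ext hc hn
      rw [this, ih r' hr]

theorem pvTripleKey_inj : Function.Injective pyTripleKey := by
  intro a b h
  unfold pyTripleKey at h
  simp only [List.cons.injEq] at h
  obtain ⟨h1, h2⟩ := h
  obtain ⟨hs, he⟩ := pvBlocky_sep_inj _ (pvBlocky_encSig a.2.1) _ (pvBlocky_encSig b.2.1) _ _ h2
  have hs' := pvEncSig_inj _ _ hs
  simp only [List.cons.injEq] at he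
  exact Prod.ext h1 (Prod.ext hs' he.1)

-- ---- lex order facts on List Int ----
theorem pv_lex_append_sep : ∀ (l1 : List Int), PvBlocky l1 → ∀ (l2 : List Int), PvBlocky l2 →
    l1 < l2 → ∀ (w1 w2 : List Int), l1 ++ (-2 :: w1) < l2 ++ (-2 :: w2) := by
  intro l1 h1
  induction h1 with
  | nil =>
    intro l2 h2 hlt w1 w2
    cases h2 with
    | nil => simp at hlt
    | cons t v ht hr =>
      simp only [List.nil_append, List.cons_append]
      exact List.cons_lt_cons_iff.mpr (Or.inl (by omega))
  | cons t v ht hr ih =>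
    intro l2 h2 hlt w1 w2
    cases h2 with
    | nil => exact absurd hlt (List.not_lt_nil _)
    | cons t' v' ht' hr' =>
      simp only [List.cons_append]
      rcases List.cons_lt_cons_iff.mp hlt with h | ⟨he, h⟩
      · exact List.cons_lt_cons_iff.mpr (Or.inl h)
      · rcases List.cons_lt_cons_iff.mp h with h' | ⟨he', h'⟩
        · exact List.cons_lt_cons_iff.mpr (Or.inr ⟨he, List.cons_lt_cons_iff.mpr (Or.inl h')⟩)
        · exact List.cons_lt_cons_iff.mpr (Or.inr ⟨he,
            List.cons_lt_cons_iff.mpr (Or.inr ⟨he', ih _ hr' h' w1 w2⟩)⟩)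


-- core lex-order facts on List Int (the sort keys); the library's order lemmas are stated for
-- the Mathlib lexicographic instances, which are not syntactically the ones the ports elaborate
-- with, so these small facts are proved directly against the core order
theorem pv_listlt_irrefl : ∀ (a : List Int), ¬ a < a := by
  intro a
  induction a with
  | nil => exact List.not_lt_nil _
  | cons x t ih =>
    intro h
    rcases List.cons_lt_cons_iff.mp h with h | ⟨-, h⟩
    · omega
    · exact ih h

theorem pv_listlt_trans : ∀ (a b c : List Int), a < b → b < c → a < c := by
  intro a
  induction a with
  | nil =>
    intro b c h1 h2
    cases c with
    | nil => exact absurd h2 (List.not_lt_nil b)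
    | cons z u => exact List.nil_lt_cons z u
  | cons x t ih =>
    intro b c h1 h2
    cases b with
    | nil => exact absurd h1 (List.not_lt_nil _)
    | cons y s =>
      cases c with
      | nil => exact absurd h2 (List.not_lt_nil _)
      | cons z u =>
        rcases List.cons_lt_cons_iff.mp h1 with hxy | ⟨hxy, hts⟩ <;>
          rcases List.cons_lt_cons_iff.mp h2 with hyz | ⟨hyz, hsu⟩
        · exact List.cons_lt_cons_iff.mpr (Or.inl (by omega))
        · exact List.cons_lt_cons_iff.mpr (Or.inl (by omega))
        · exact List.cons_lt_cons_iff.mpr (Or.inl (by omega))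
        · exact List.cons_lt_cons_iff.mpr (Or.inr ⟨by omega, ih s u hts hsu⟩)

theorem pv_listlt_asymm : ∀ (a b : List Int), a < b → ¬ b < a := by
  intro a b h1 h2
  exact pv_listlt_irrefl a (pv_listlt_trans a b a h1 h2)

theorem pv_listlt_tri : ∀ (a b : List Int), a < b ∨ a = b ∨ b < a := by
  intro a
  induction a with
  | nil =>
    intro b
    cases b with
    | nil => exact Or.inr (Or.inl rfl)
    | cons y s => exact Or.inl (List.nil_lt_cons y s)
  | cons x t ih =>
    intro b
    cases b with
    | nil => exact Or.inr (Or.inr (List.nil_lt_cons x t))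
    | cons y s =>
      rcases Int.lt_trichotomy x y with h | h | h
      · exact Or.inl (List.cons_lt_cons_iff.mpr (Or.inl h))
      · rcases ih s with h2 | h2 | h2
        · exact Or.inl (List.cons_lt_cons_iff.mpr (Or.inr ⟨h, h2⟩))
        · exact Or.inr (Or.inl (by rw [h, h2]))
        · exact Or.inr (Or.inr (List.cons_lt_cons_iff.mpr (Or.inr ⟨h.symm, h2⟩)))
      · exact Or.inr (Or.inr (List.cons_lt_cons_iff.mpr (Or.inl h)))

-- insertion sort with a List Int key is pairwise non-descending (core order)
theorem pv_insertBy_pairwise {α : Type} (R : α → α → Prop) (before : α → α → Bool)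
    (h1 : ∀ a b, before a b = true → R a b)
    (h2 : ∀ a b c, before a b = true → R b c → R a c)
    (h3 : ∀ a b, before a b = false → R b a)
    (x : α) : ∀ (ys : List α), ys.Pairwise R →
      (PySem.List.insertBy before x ys).Pairwise R := by
  intro ys
  induction ys with
  | nil => intro _; simp [PySem.List.insertBy]
  | cons y t ih =>
    intro hp
    rw [show PySem.List.insertBy before x (y :: t)
        = if before x y then x :: y :: t else y :: PySem.List.insertBy before x t from rfl]
    rcases List.pairwise_cons.mp hp with ⟨hyall, hpt⟩
    by_cases hb : before x y = true
    · simp only [hb, if_true]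
      apply List.pairwise_cons.mpr
      refine ⟨?_, hp⟩
      intro z hz
      rcases List.mem_cons.mp hz with rfl | hz'
      · exact h1 x z hb
      · exact h2 x y z hb (hyall z hz')
    · have hb' : before x y = false := by simpa using hb
      simp only [hb', Bool.false_eq_true, if_false]
      apply List.pairwise_cons.mpr
      refine ⟨?_, ih hpt⟩
      intro z hz
      rcases (PySem.List.mem_insertBy before x z t).mp hz with hzx | hz'
      · rw [hzx]; exact h3 x y hb'
      · exact hyall z hz'

theorem pv_sorted_pairwiseL {α : Type} (xs : List α) (key : α → List Int) :
    (PySem.List.sorted xs key false).Pairwise (fun a b => ¬ key b < key a) := by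
  rw [PySem.List.sorted_eq_foldl_insertBy]
  suffices h : ∀ (l : List α) (acc : List α), acc.Pairwise (fun a b => ¬ key b < key a) →
      (l.foldl (fun acc x => PySem.List.insertBy
        (fun a b => decide (key a < key b)) x acc) acc).Pairwise
        (fun a b => ¬ key b < key a) by
    exact h xs [] (by simp)
  intro l
  induction l with
  | nil => intro acc h; simpa using h
  | cons x t ih =>
    intro acc h
    simp only [List.foldl_cons]
    apply ih
    refine pv_insertBy_pairwise _ _ ?_ ?_ ?_ x acc h
    · intro a b hd
      exact pv_listlt_asymm _ _ (of_decide_eq_true hd)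
    · intro a b c hd hbc hca
      exact hbc (pv_listlt_trans _ _ _ hca (of_decide_eq_true hd))
    · intro a b hd
      exact of_decide_eq_false hd

theorem pv_sorted_uniqueL {α : Type} (key : α → List Int) (hinj : Function.Injective key)
    {l1 l2 : List α} (hp : l1.Perm l2)
    (h1 : l1.Pairwise (fun a b => ¬ key b < key a))
    (h2 : l2.Pairwise (fun a b => ¬ key b < key a)) : l1 = l2 := by
  refine List.eq_of_perm_of_sorted ?_ h1 h2 hp
  intro a b _ _ hab hba
  apply hinj
  rcases pv_listlt_tri (key a) (key b) with h | h | h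
  · exact absurd h hba
  · exact h
  · exact absurd h hab

theorem pv_append_lt_iff : ∀ (pre u v : List Int), pre ++ u < pre ++ v ↔ u < v := by
  intro pre
  induction pre with
  | nil => intro u v; simp
  | cons x t ih =>
    intro u v
    simp only [List.cons_append]
    rw [List.cons_lt_cons_iff]
    constructor
    · rintro (h | ⟨-, h⟩)
      · omega
      · exact (ih u v).mp h
    · intro h
      exact Or.inr ⟨rfl, (ih u v).mpr h⟩

-- ---- per-cell canonical grouping ----
-- the groups of one cell in A's emission order: signatures sorted, elements sorted
def pvCellGroups (f : Int → List (List Int × Int)) (cell : List Int) :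
    List (List (List Int × Int) × List Int) :=
  (PySem.List.sorted (PySem.Set.ofList (cell.map f)) pyEncSig false).map
    (fun k => (k, PySem.List.sorted (cell.filter (fun e => f e == k)) (fun x => x) false))

def pvFlag (f : Int → List (List Int × Int)) (cell : List Int) : Bool :=
  !(cell.length == 1) && !((PySem.Set.ofList (cell.map f)).length == 1)

theorem pv_sorted_single {α κ : Type} [LT κ] [DecidableLT κ] (x : α) (key : α → κ) :
    PySem.List.sorted [x] key false = [x] := rfl

theorem pv_grouped_keys (f : Int → List (List Int × Int)) (cell : List Int) :
    (cell.foldl (fun g e => g.modify (f e) [] (fun l => l ++ [e])) PySem.Dict.empty).keys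
      = PySem.Set.ofList (cell.map f) := by
  rw [PySem.Dict.keys_foldl_modify_key cell f [] (fun _ x => fun l => l ++ [x])]
  rfl

theorem pv_grouped_getD (f : Int → List (List Int × Int)) (cell : List Int)
    (k : List (List Int × Int)) :
    (cell.foldl (fun g e => g.modify (f e) [] (fun l => l ++ [e])) PySem.Dict.empty).getD k []
      = cell.filter (fun e => f e == k) := by
  have h2 : cell.foldl (fun g e => g.modify (f e) [] (fun l => l ++ [e])) PySem.Dict.empty
      = List.foldl (fun d p => d.modify p.1 [] (fun x => x ++ [p.2])) PySem.Dict.empty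
          (cell.map (fun e => (f e, e))) := by
    rw [List.foldl_map]
  rw [h2, PySem.Dict.getD_foldl_modify_append]
  rw [List.filter_map]
  simp [List.map_map, Function.comp_def]

theorem pv_grouped_size (f : Int → List (List Int × Int)) (cell : List Int) :
    (cell.foldl (fun g e => g.modify (f e) [] (fun l => l ++ [e])) PySem.Dict.empty).size
      = (PySem.Set.ofList (cell.map f)).length := by
  have := congrArg List.length (pv_grouped_keys f cell)
  simpa [PySem.Dict.size, PySem.Dict.keys] using this

theorem pv_cellGroups_len1 (f : Int → List (List Int × Int)) (cell : List Int)
    (h : cell.length = 1) : (pvCellGroups f cell).map (·.2) = [cell] := by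
  obtain ⟨e, rfl⟩ := List.length_eq_one_iff.mp h
  simp only [pvCellGroups, List.map_cons, List.map_nil]
  have hset : PySem.Set.ofList [f e] = [f e] :=
    PySem.Set.ofList_eq_self_of_nodup [f e] (List.nodup_singleton _)
  rw [hset, pv_sorted_single]
  simp [pv_sorted_single]

theorem pv_mem_of_ofList_singleton {α : Type} [BEq α] [LawfulBEq α] {xs : List α} {k0 : α}
    (h : PySem.Set.ofList xs = [k0]) : ∀ x ∈ xs, x = k0 := by
  intro x hx
  have : x ∈ PySem.Set.ofList xs := (PySem.Set.mem_ofList xs x).mpr hx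
  rw [h] at this
  simpa using this

theorem pv_cellGroups_uniform (f : Int → List (List Int × Int)) (cell : List Int)
    (k0 : List (List Int × Int)) (hk : PySem.Set.ofList (cell.map f) = [k0]) :
    (pvCellGroups f cell).map (·.2) = [PySem.List.sorted cell (fun x => x) false] := by
  have hall : ∀ e ∈ cell, f e = k0 := by
    intro e he
    exact pv_mem_of_ofList_singleton hk (f e) (List.mem_map_of_mem he)
  have hfil : cell.filter (fun e => f e == k0) = cell := by
    rw [List.filter_eq_self]
    intro e he
    simpa using hall e he
  simp only [pvCellGroups, hk, pv_sorted_single, List.map_cons, List.map_nil, hfil]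

-- A's per-cell branch, in canonical form
theorem pv_cellA (f : Int → List (List Int × Int)) (acc : List (List Int) × Bool)
    (cell : List Int) :
    (if cell.length == 1 then (acc.1 ++ [cell], acc.2)
     else
       if (cell.foldl (fun g e => g.modify (f e) [] (fun l => l ++ [e]))
           PySem.Dict.empty).size == 1 then
         (acc.1 ++ [PySem.List.sorted cell (fun x => x) false], acc.2)
       else
         (acc.1 ++ (PySem.List.sorted (cell.foldl
             (fun g e => g.modify (f e) [] (fun l => l ++ [e]))
             PySem.Dict.empty).keys pyEncSig false).map
             (fun k => PySem.List.sorted ((cell.foldl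
               (fun g e => g.modify (f e) [] (fun l => l ++ [e]))
               PySem.Dict.empty).getD k []) (fun x => x) false),
          true))
    = (acc.1 ++ (pvCellGroups f cell).map (·.2), acc.2 || pvFlag f cell) := by
  by_cases h1 : cell.length = 1
  · have hif : (cell.length == 1) = true := by simpa using h1
    rw [pv_cellGroups_len1 f cell h1]
    simp [hif, pvFlag]
  · have hif : (cell.length == 1) = false := by simpa using h1
    simp only [hif, Bool.false_eq_true, if_false]
    by_cases hs : (PySem.Set.ofList (cell.map f)).length = 1
    · obtain ⟨k0, hk0⟩ := List.length_eq_one_iff.mp hs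
      have hsz : ((cell.foldl (fun g e => g.modify (f e) [] (fun l => l ++ [e]))
          PySem.Dict.empty).size == 1) = true := by
        simp [pv_grouped_size, hs]
      rw [pv_cellGroups_uniform f cell k0 hk0]
      simp only [hsz, if_true, pvFlag, hif]
      simp [hs]
    · have hsz : ((cell.foldl (fun g e => g.modify (f e) [] (fun l => l ++ [e]))
          PySem.Dict.empty).size == 1) = false := by
        simp [pv_grouped_size, hs]
      simp only [hsz, Bool.false_eq_true, if_false]
      have hmap : (PySem.List.sorted (cell.foldl
            (fun g e => g.modify (f e) [] (fun l => l ++ [e])) PySem.Dict.empty).keys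
            pyEncSig false).map
            (fun k => PySem.List.sorted ((cell.foldl
              (fun g e => g.modify (f e) [] (fun l => l ++ [e]))
              PySem.Dict.empty).getD k []) (fun x => x) false)
          = (pvCellGroups f cell).map (·.2) := by
        rw [pv_grouped_keys]
        unfold pvCellGroups
        rw [List.map_map]
        apply List.map_congr_left
        intro k _
        simp [pv_grouped_getD f cell k]
      rw [hmap]
      have hfl : pvFlag f cell = true := by simp [pvFlag, hif, hs]
      simp [hfl]

theorem pv_foldl_or {α : Type} (l : List α) (p : α → Bool) :
    ∀ b : Bool, l.foldl (fun acc x => acc || p x) b = (b || l.any p) := by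
  induction l with
  | nil => intro b; simp
  | cons x t ih => intro b; simp [List.foldl_cons, ih, Bool.or_assoc]

theorem pv_stepA_eq (bases : List Int) (current : List (List Int)) :
    stepA bases current =
      (current.flatMap (fun cell =>
         (pvCellGroups (pySignature bases (pyBaseColors bases current)) cell).map (·.2)),
       current.any (pvFlag (pySignature bases (pyBaseColors bases current)))) := by
  simp only [stepA]
  have h := PySem.List.foldl_congr_mem current _
    (fun (acc : List (List Int) × Bool) cell =>
      ((fun (a : List (List Int)) (cell : List Int) => a ++ (pvCellGroups
          (pySignature bases (pyBaseColors bases current)) cell).map (·.2)) acc.1 cell,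
       (fun (b : Bool) (cell : List Int) => b || pvFlag
          (pySignature bases (pyBaseColors bases current)) cell) acc.2 cell))
    ([], false)
    (fun acc x _ => pv_cellA (pySignature bases (pyBaseColors bases current)) acc x)
  rw [h, PySem.List.foldl_prod_mk
    (f := fun (a : List (List Int)) (cell : List Int) => a ++ (pvCellGroups
        (pySignature bases (pyBaseColors bases current)) cell).map (·.2))
    (g := fun (b : Bool) (cell : List Int) => b || pvFlag
        (pySignature bases (pyBaseColors bases current)) cell)]
  rw [PySem.List.foldl_append_eq_flatMap, pv_foldl_or]
  simp

-- ---- B's pass: the sorted triples are the canonical groups, flattened ----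

theorem pv_flatMap_congr_mem {α β : Type} (l : List α) (F H : α → List β)
    (h : ∀ a ∈ l, F a = H a) : l.flatMap F = l.flatMap H := by
  simp only [List.flatMap_def]
  exact congrArg List.flatten (List.map_congr_left h)

theorem pv_perm_flatMap_congr {α β : Type} (l : List α) (F H : α → List β)
    (h : ∀ a ∈ l, (F a).Perm (H a)) : (l.flatMap F).Perm (l.flatMap H) := by
  induction l with
  | nil => simp
  | cons a t ih =>
    simp only [List.flatMap_cons]
    exact (h a List.mem_cons_self).append (ih (fun x hx => h x (List.mem_cons_of_mem a hx)))

theorem pv_partition_perm {α κ : Type} [BEq κ] [LawfulBEq κ] (g : α → κ) :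
    ∀ (keys : List κ) (cell : List α), keys.Nodup → (∀ e ∈ cell, g e ∈ keys) →
    (keys.flatMap (fun k => cell.filter (fun e => g e == k))).Perm cell := by
  intro keys
  induction keys with
  | nil =>
    intro cell _ hcov
    have : cell = [] := List.eq_nil_iff_forall_not_mem.mpr (fun x hx => by simpa using hcov x hx)
    simp [this]
  | cons k ks ih =>
    intro cell hnd hcov
    simp only [List.flatMap_cons]
    have hknotin : k ∉ ks := (List.nodup_cons.mp hnd).1
    have hrest : ks.flatMap (fun k' => cell.filter (fun e => g e == k'))
        = ks.flatMap (fun k' => (cell.filter (fun e => !(g e == k))).filter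
            (fun e => g e == k')) := by
      apply pv_flatMap_congr_mem
      intro k' hk'
      rw [List.filter_filter]
      apply List.filter_congr
      intro e _
      by_cases hge : g e = k'
      · have hkk : k' ≠ k := fun hc => hknotin (hc ▸ hk')
        have hgek : g e ≠ k := fun hc => hkk (hge.symm.trans hc)
        simpa [hge] using hkk
      · simp [hge]
    rw [hrest]
    have hcov' : ∀ e ∈ cell.filter (fun e => !(g e == k)), g e ∈ ks := by
      intro e he
      obtain ⟨hec, hne⟩ := List.mem_filter.mp he
      have := hcov e hec
      simp only [List.mem_cons] at this
      rcases this with h | h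
      · simp [h] at hne
      · exact h
    have hmain := ih (cell.filter (fun e => !(g e == k))) (List.nodup_cons.mp hnd).2 hcov'
    exact (hmain.append_left _).trans (List.filter_append_perm _ cell)

theorem pv_mem_cellGroups {f : Int → List (List Int × Int)} {cell : List Int}
    {g : List (List Int × Int) × List Int} (hg : g ∈ pvCellGroups f cell) :
    g.2 = PySem.List.sorted (cell.filter (fun e => f e == g.1)) (fun x => x) false
      ∧ g.1 ∈ PySem.Set.ofList (cell.map f) := by
  unfold pvCellGroups at hg
  obtain ⟨k, hk, rfl⟩ := List.mem_map.mp hg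
  exact ⟨rfl, (PySem.List.mem_sorted _ _ _ _).mp hk⟩

theorem pv_sig_of_mem_group {f : Int → List (List Int × Int)} {cell : List Int}
    {g : List (List Int × Int) × List Int} (hg : g ∈ pvCellGroups f cell) :
    ∀ e ∈ g.2, f e = g.1 ∧ e ∈ cell := by
  intro e he
  rw [(pv_mem_cellGroups hg).1] at he
  have := (PySem.List.mem_sorted _ _ _ _).mp he
  obtain ⟨hec, hfe⟩ := List.mem_filter.mp this
  exact ⟨by simpa using hfe, hec⟩

theorem pv_group_ne_nil {f : Int → List (List Int × Int)} {cell : List Int}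
    {g : List (List Int × Int) × List Int} (hg : g ∈ pvCellGroups f cell) : g.2 ≠ [] := by
  obtain ⟨h2, h1⟩ := pv_mem_cellGroups hg
  rw [h2, Ne, PySem.List.sorted_eq_nil_iff]
  intro hfil
  obtain ⟨e, he, hfe⟩ := List.mem_map.mp ((PySem.Set.mem_ofList _ _).mp h1)
  have := List.filter_eq_nil_iff.mp hfil e he
  simp [hfe] at this

theorem pv_cellGroups_flat_perm (f : Int → List (List Int × Int)) (cell : List Int) :
    ((pvCellGroups f cell).flatMap (·.2)).Perm cell := by
  unfold pvCellGroups
  rw [List.flatMap_map]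
  have h1 : ((PySem.List.sorted (PySem.Set.ofList (cell.map f)) pyEncSig false).flatMap
      (fun k => (k, PySem.List.sorted (cell.filter (fun e => f e == k)) (fun x => x) false).2)).Perm
      ((PySem.List.sorted (PySem.Set.ofList (cell.map f)) pyEncSig false).flatMap
      (fun k => cell.filter (fun e => f e == k))) :=
    pv_perm_flatMap_congr _ _ _ (fun k _ => PySem.List.sorted_perm _ _ _)
  refine h1.trans ?_
  apply pv_partition_perm
  · exact ((PySem.List.sorted_perm _ _ _).nodup_iff).mpr (PySem.Set.nodup_ofList _)
  · intro e he
    rw [PySem.List.mem_sorted, PySem.Set.mem_ofList]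
    exact List.mem_map_of_mem he

-- keyT facts
theorem pv_keyT_eq (i : Int) (k : List (List Int × Int)) (e : Int) :
    pyTripleKey (i, k, e) = (i :: (pyEncSig k ++ [-2])) ++ [e] := by
  simp [pyTripleKey]

theorem pv_keyT_R_of_le {i : Int} {k : List (List Int × Int)} {e1 e2 : Int} (h : e1 ≤ e2) :
    ¬ pyTripleKey (i, k, e2) < pyTripleKey (i, k, e1) := by
  intro hlt
  rw [pv_keyT_eq, pv_keyT_eq, pv_append_lt_iff] at hlt
  rcases List.cons_lt_cons_iff.mp hlt with h2 | ⟨-, h2⟩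
  · omega
  · exact List.not_lt_nil _ h2

theorem pv_keyT_lt_of_sig_lt {i : Int} {k1 k2 : List (List Int × Int)} {e1 e2 : Int}
    (h : pyEncSig k1 < pyEncSig k2) :
    pyTripleKey (i, k1, e1) < pyTripleKey (i, k2, e2) := by
  unfold pyTripleKey
  apply List.cons_lt_cons_iff.mpr
  refine Or.inr ⟨rfl, ?_⟩
  have := pv_lex_append_sep _ (pvBlocky_encSig k1) _ (pvBlocky_encSig k2) h [e1] [e2]
  simpa using this

theorem pv_keyT_lt_of_idx_lt {i1 i2 : Int} {k1 k2 : List (List Int × Int)} {e1 e2 : Int}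
    (h : i1 < i2) : pyTripleKey (i1, k1, e1) < pyTripleKey (i2, k2, e2) :=
  List.cons_lt_cons_iff.mpr (Or.inl h)

-- the per-cell triples of the canonical flattening are a rearrangement of the cell's triples
theorem pv_cell_triples_perm (f : Int → List (List Int × Int)) (i : Int) (cell : List Int) :
    ((pvCellGroups f cell).flatMap (fun g => g.2.map (fun e => (i, g.1, e)))).Perm
      (cell.map (fun e => (i, f e, e))) := by
  have h1 : (pvCellGroups f cell).flatMap (fun g => g.2.map (fun e => (i, g.1, e)))
      = (pvCellGroups f cell).flatMap (fun g => g.2.map (fun e => (i, f e, e))) :=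
    pv_flatMap_congr_mem _ _ _ (fun g hg =>
      List.map_congr_left (fun e he => by rw [(pv_sig_of_mem_group hg e he).1]))
  rw [h1, ← List.map_flatMap]
  exact (pv_cellGroups_flat_perm f cell).map _

-- the canonical flattening is pairwise non-descending in the triple key
theorem pv_cand_pairwise (f : Int → List (List Int × Int)) (current : List (List Int)) :
    ((PySem.List.enumerate current 0).flatMap (fun ic =>
      (pvCellGroups f ic.2).flatMap (fun g => g.2.map (fun e => (ic.1, g.1, e))))).Pairwise
      (fun a b => ¬ pyTripleKey b < pyTripleKey a) := by
  apply List.pairwise_flatMap.mpr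
  constructor
  · intro ic _
    apply List.pairwise_flatMap.mpr
    constructor
    · intro g hg
      apply List.pairwise_map.mpr
      have hs : (PySem.List.sorted (ic.2.filter (fun e => f e == g.1))
          (fun x => x) false).Pairwise (fun a b => a ≤ b) :=
        PySem.List.sorted_pairwise _ _
      rw [← (pv_mem_cellGroups hg).1] at hs
      exact hs.imp (fun h => pv_keyT_R_of_le h)
    · unfold pvCellGroups
      apply List.pairwise_map.mpr
      have hp : (PySem.List.sorted (PySem.Set.ofList (ic.2.map f)) pyEncSig false).Pairwise
          (fun k1 k2 => ¬ pyEncSig k2 < pyEncSig k1) :=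
        pv_sorted_pairwiseL _ pyEncSig
      have hn : (PySem.List.sorted (PySem.Set.ofList (ic.2.map f)) pyEncSig false).Pairwise
          (· ≠ ·) :=
        ((PySem.List.sorted_perm _ _ _).nodup_iff).mpr (PySem.Set.nodup_ofList _)
      refine (hp.and hn).imp ?_
      rintro k1 k2 ⟨hnlt, hne⟩ x hx y hy
      obtain ⟨e1, he1, rfl⟩ := List.mem_map.mp hx
      obtain ⟨e2, he2, rfl⟩ := List.mem_map.mp hy
      have henc : pyEncSig k1 < pyEncSig k2 := by
        rcases pv_listlt_tri (pyEncSig k1) (pyEncSig k2) with h | h | h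
        · exact h
        · exact absurd (pvEncSig_inj _ _ h) hne
        · exact absurd h hnlt
      exact pv_listlt_asymm _ _ (pv_keyT_lt_of_sig_lt henc)
  · refine (PySem.List.pairwise_lt_enumerate current 0).imp ?_
    intro ic jc hlt x hx y hy
    obtain ⟨g1, hg1, hx'⟩ := List.mem_flatMap.mp hx
    obtain ⟨e1, he1, rfl⟩ := List.mem_map.mp hx'
    obtain ⟨g2, hg2, hy'⟩ := List.mem_flatMap.mp hy
    obtain ⟨e2, he2, rfl⟩ := List.mem_map.mp hy'
    exact pv_listlt_asymm _ _ (pv_keyT_lt_of_idx_lt hlt)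

-- the sorted triple list IS the canonical flattening
theorem pv_sorted_triples (f : Int → List (List Int × Int)) (current : List (List Int)) :
    PySem.List.sorted ((PySem.List.enumerate current 0).flatMap
        (fun ic => ic.2.map (fun e => (ic.1, f e, e)))) pyTripleKey false
      = (PySem.List.enumerate current 0).flatMap (fun ic =>
          (pvCellGroups f ic.2).flatMap (fun g => g.2.map (fun e => (ic.1, g.1, e)))) := by
  apply pv_sorted_uniqueL pyTripleKey pvTripleKey_inj
  · exact (PySem.List.sorted_perm _ _ _).trans
      (pv_perm_flatMap_congr _ _ _
        (fun ic _ => (pv_cell_triples_perm f ic.1 ic.2).symm))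
  · exact pv_sorted_pairwiseL _ pyTripleKey
  · exact pv_cand_pairwise f current

-- ---- the group-by scan ----
def pvFlush (st : List (List Int) × List Int × Option (Int × List (List Int × Int))) :
    List (List Int) :=
  if st.2.1.isEmpty then st.1 else st.1 ++ [st.2.1]

theorem pv_scan_same (es : List Int) : ∀ (acc : List (List Int)) (c : List Int) (i : Int)
    (k : List (List Int × Int)),
    List.foldl pyScanStep (acc, c, some (i, k)) (es.map (fun e => (i, k, e)))
      = (acc, c ++ es, some (i, k)) := by
  induction es with
  | nil => intro acc c i k; simp
  | cons e t ih =>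
    intro acc c i k
    simp only [List.map_cons, List.foldl_cons]
    have hstep : pyScanStep (acc, c, some (i, k)) (i, k, e) = (acc, c ++ [e], some (i, k)) := by
      simp [pyScanStep]
    rw [hstep, ih]
    simp

theorem pv_scan_run (es : List Int) (i : Int) (k : List (List Int × Int))
    (acc : List (List Int)) (grp : List Int) (prev : Option (Int × List (List Int × Int)))
    (hne : es ≠ []) (hprev : prev ≠ some (i, k)) :
    List.foldl pyScanStep (acc, grp, prev) (es.map (fun e => (i, k, e)))
      = ((if grp.isEmpty then acc else acc ++ [grp]), es, some (i, k)) := by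
  obtain ⟨e, t, rfl⟩ := List.exists_cons_of_ne_nil hne
  simp only [List.map_cons, List.foldl_cons]
  have hcond : (prev == some (i, k)) = false := by simpa using hprev
  have hstep : pyScanStep (acc, grp, prev)
      (i, k, e) = ((if grp.isEmpty then acc else acc ++ [grp]), [e], some (i, k)) := by
    simp [pyScanStep, hcond]
  rw [hstep, pv_scan_same]
  simp

theorem pv_scan_runs : ∀ (rs : List ((Int × List (List Int × Int)) × List Int))
    (acc : List (List Int)) (grp : List Int) (prev : Option (Int × List (List Int × Int))),
    (∀ r ∈ rs, r.2 ≠ []) → rs.Pairwise (fun a b => a.1 ≠ b.1) →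
    (∀ r0 ∈ rs.head?, prev ≠ some r0.1) →
    pvFlush (List.foldl pyScanStep (acc, grp, prev)
        (rs.flatMap (fun r => r.2.map (fun e => (r.1.1, r.1.2, e)))))
      = (acc ++ (if grp.isEmpty then [] else [grp])) ++ rs.map (·.2) := by
  intro rs
  induction rs with
  | nil =>
    intro acc grp prev _ _ _
    cases grp <;> simp [pvFlush]
  | cons r rs ih =>
    intro acc grp prev hne hpw hprev
    simp only [List.flatMap_cons, List.foldl_append]
    have h0 : prev ≠ some r.1 := hprev r (by simp)
    have hrun := pv_scan_run r.2 r.1.1 r.1.2 acc grp prev (hne r (by simp))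
      (by simpa using h0)
    rw [hrun]
    have hr2 : r.2 ≠ [] := hne r (by simp)
    have ihr := ih (if grp.isEmpty then acc else acc ++ [grp]) r.2 (some (r.1.1, r.1.2))
      (fun x hx => hne x (by simp [hx]))
      hpw.of_cons
      (by
        intro r0 h0'
        have hr0 : r0 ∈ rs := List.mem_of_mem_head? h0'
        have hne1 : r.1 ≠ r0.1 := (List.pairwise_cons.mp hpw).1 r0 hr0
        intro hcc
        apply hne1
        have h2 := Option.some.inj hcc
        rw [← h2]
      )
    rw [ihr]
    have hr2e : r.2.isEmpty = false := by
      cases hx : r.2 with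
      | nil => exact absurd hx hr2
      | cons a b => rfl
    rw [hr2e]
    cases hg : grp.isEmpty <;> simp [List.append_assoc]

theorem pv_flatMap_enumerate {β : Type} (l : List (List Int)) (H : List Int → List β) :
    ∀ s : Int, (PySem.List.enumerate l s).flatMap (fun ic => H ic.2) = l.flatMap H := by
  induction l with
  | nil => intro s; simp [PySem.List.enumerate]
  | cons c t ih =>
    intro s
    rw [PySem.List.enumerate_cons]
    simp only [List.flatMap_cons, ih (s + 1)]

-- B's pass computes the flattened canonical groups
theorem pv_stepB_eq (bases : List Int) (current : List (List Int)) :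
    stepB bases current =
      current.flatMap (fun cell =>
        (pvCellGroups (pySignature bases (pyBaseColors bases current)) cell).map (·.2)) := by
  simp only [stepB]
  rw [pv_sorted_triples (pySignature bases (pyBaseColors bases current)) current]
  have hruns : (PySem.List.enumerate current 0).flatMap (fun ic =>
      (pvCellGroups (pySignature bases (pyBaseColors bases current)) ic.2).flatMap
        (fun g => g.2.map (fun e => (ic.1, g.1, e))))
    = ((PySem.List.enumerate current 0).flatMap (fun ic =>
        (pvCellGroups (pySignature bases (pyBaseColors bases current)) ic.2).map
          (fun g => ((ic.1, g.1), g.2)))).flatMap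
        (fun r => r.2.map (fun e => (r.1.1, r.1.2, e))) := by
    rw [List.flatMap_assoc]
    apply pv_flatMap_congr_mem
    intro ic _
    rw [List.flatMap_map]
  rw [hruns]
  have hscan := pv_scan_runs ((PySem.List.enumerate current 0).flatMap (fun ic =>
      (pvCellGroups (pySignature bases (pyBaseColors bases current)) ic.2).map
        (fun g => ((ic.1, g.1), g.2)))) [] [] none
    (by
      intro r hr
      obtain ⟨ic, hic, hr'⟩ := List.mem_flatMap.mp hr
      obtain ⟨g, hg, rfl⟩ := List.mem_map.mp hr'
      exact pv_group_ne_nil hg)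
    (by
      apply List.pairwise_flatMap.mpr
      constructor
      · intro ic _
        apply List.pairwise_map.mpr
        have hn : (pvCellGroups (pySignature bases (pyBaseColors bases current)) ic.2).Pairwise
            (fun g1 g2 => g1.1 ≠ g2.1) := by
          unfold pvCellGroups
          apply List.pairwise_map.mpr
          refine (((PySem.List.sorted_perm _ _ _).nodup_iff).mpr
            (PySem.Set.nodup_ofList _)).imp ?_
          intro k1 k2 h hc
          exact h hc
        refine hn.imp ?_
        intro g1 g2 h hc
        apply h
        have h2 := congrArg (fun p : Int × List (List Int × Int) => p.2) hc
        simpa using h2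
      · refine (PySem.List.pairwise_lt_enumerate current 0).imp ?_
        intro ic jc hlt x hx y hy
        obtain ⟨g1, hg1, rfl⟩ := List.mem_map.mp hx
        obtain ⟨g2, hg2, rfl⟩ := List.mem_map.mp hy
        intro hc
        have h2 := congrArg (fun p : Int × List (List Int × Int) => p.1) hc
        simp at h2
        omega)
    (by intro r0 _; simp)
  have hflush : pvFlush (List.foldl pyScanStep ([], [], none)
      (((PySem.List.enumerate current 0).flatMap (fun ic =>
        (pvCellGroups (pySignature bases (pyBaseColors bases current)) ic.2).map
          (fun g => ((ic.1, g.1), g.2)))).flatMap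
        (fun r => r.2.map (fun e => (r.1.1, r.1.2, e)))))
      = (((PySem.List.enumerate current 0).flatMap (fun ic =>
        (pvCellGroups (pySignature bases (pyBaseColors bases current)) ic.2).map
          (fun g => ((ic.1, g.1), g.2)))).map (·.2)) := by
    rw [hscan]
    simp
  rw [show ∀ st : List (List Int) × List Int × Option (Int × List (List Int × Int)),
      (if st.2.1.isEmpty then st.1 else st.1 ++ [st.2.1]) = pvFlush st from fun st => rfl]
  rw [hflush, List.map_flatMap]
  have hmaps : ∀ ic : Int × List Int,
      ((pvCellGroups (pySignature bases (pyBaseColors bases current)) ic.2).map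
        (fun g => ((ic.1, g.1), g.2))).map (fun r => r.2)
      = (pvCellGroups (pySignature bases (pyBaseColors bases current)) ic.2).map (·.2) := by
    intro ic
    rw [List.map_map]
    rfl
  rw [pv_flatMap_congr_mem _ _ _ (fun ic _ => hmaps ic)]
  exact pv_flatMap_enumerate current
    (fun cell => (pvCellGroups (pySignature bases (pyBaseColors bases current)) cell).map (·.2)) 0

-- ---- fixpoint after an unchanged pass ----
theorem pv_flatMap_eq_map_of {α β : Type} (l : List α) (F : α → List β) (g : α → β)
    (h : ∀ a ∈ l, F a = [g a]) : l.flatMap F = l.map g := by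
  induction l with
  | nil => simp
  | cons a t ih =>
    simp only [List.flatMap_cons, List.map_cons]
    rw [h a List.mem_cons_self, ih (fun x hx => h x (List.mem_cons_of_mem a hx))]
    rfl

theorem pv_ofList_const {α : Type} [BEq α] [LawfulBEq α] :
    ∀ (ys : List α) (k0 : α), ys ≠ [] → (∀ y ∈ ys, y = k0) → PySem.Set.ofList ys = [k0] := by
  intro ys
  induction ys with
  | nil => intro k0 h _; exact absurd rfl h
  | cons y t ih =>
    intro k0 _ hall
    have hy : y = k0 := hall y List.mem_cons_self
    rw [PySem.Set.ofList_cons, hy]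
    cases ht : t with
    | nil => rfl
    | cons a b =>
      have htk : PySem.Set.ofList t = [k0] :=
        ih k0 (by simp [ht]) (fun x hx => hall x (List.mem_cons_of_mem y hx))
      rw [← ht, htk]
      simp [PySem.Set.discard]

theorem pv_fixpoint (bases : List Int) (current : List (List Int))
    (h : (stepA bases current).2 = false) :
    stepB bases (stepA bases current).1 = (stepA bases current).1 := by
  rw [pv_stepA_eq] at h ⊢
  simp only at h ⊢
  set f := pySignature bases (pyBaseColors bases current) with hf
  have hflag : ∀ cell ∈ current, pvFlag f cell = false := by
    intro cell hc
    simpa using List.any_eq_false.mp h cell hc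
  have hout : ∀ cell ∈ current, (pvCellGroups f cell).map (·.2)
      = [if cell.length == 1 then cell else PySem.List.sorted cell (fun x => x) false] := by
    intro cell hc
    by_cases h1 : cell.length = 1
    · rw [pv_cellGroups_len1 f cell h1]
      simp [h1]
    · have hfl := hflag cell hc
      unfold pvFlag at hfl
      have hif : (cell.length == 1) = false := by simpa using h1
      rw [hif] at hfl
      simp only [Bool.not_false, Bool.true_and, Bool.not_eq_false', beq_iff_eq] at hfl
      obtain ⟨k0, hk0⟩ := List.length_eq_one_iff.mp hfl
      rw [pv_cellGroups_uniform f cell k0 hk0]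
      simp [hif]
  have hnext : current.flatMap (fun cell => (pvCellGroups f cell).map (·.2))
      = current.map (fun cell =>
          if cell.length == 1 then cell else PySem.List.sorted cell (fun x => x) false) :=
    pv_flatMap_eq_map_of _ _ _ hout
  rw [hnext]
  set hcell : List Int → List Int := fun cell =>
    if cell.length == 1 then cell else PySem.List.sorted cell (fun x => x) false with hhc
  have hperm : ∀ cell, (hcell cell).Perm cell := by
    intro cell
    rw [hhc]
    by_cases h1 : (cell.length == 1) = true
    · simp [h1]
    · have h1' : (cell.length == 1) = false := by simpa using h1
      simp only [h1', Bool.false_eq_true, if_false]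
      exact PySem.List.sorted_perm _ _ _
  have hbc : ∀ m, pyBaseColor m (current.map hcell) = pyBaseColor m current := by
    intro m
    unfold pyBaseColor
    rw [List.map_map]
    apply List.map_congr_left
    intro cell _
    exact ((hperm cell).map _).sum_eq
  have hcol : pyBaseColors bases (current.map hcell) = pyBaseColors bases current := by
    unfold pyBaseColors
    apply PySem.List.foldl_congr_mem
    intro acc m _
    rw [hbc m]
  rw [pv_stepB_eq, hcol, ← hf]
  have hcellout : ∀ cell' ∈ current.map hcell,
      (pvCellGroups f cell').map (·.2) = [cell'] := by
    intro cell' hc'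
    obtain ⟨cell, hc, rfl⟩ := List.mem_map.mp hc'
    by_cases h1 : cell.length = 1
    · have hl1 : (cell.length == 1) = true := by simpa using h1
      have : hcell cell = cell := by rw [hhc]; simp only [hl1, if_true]
      rw [this]
      exact pv_cellGroups_len1 f cell h1
    · have hfl := hflag cell hc
      unfold pvFlag at hfl
      have hif : (cell.length == 1) = false := by simpa using h1
      rw [hif] at hfl
      simp only [Bool.not_false, Bool.true_and, Bool.not_eq_false', beq_iff_eq] at hfl
      obtain ⟨k0, hk0⟩ := List.length_eq_one_iff.mp hfl
      have hcc : hcell cell = PySem.List.sorted cell (fun x => x) false := by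
        rw [hhc]
        simp only [hif, Bool.false_eq_true, if_false]
      have hnenil : cell ≠ [] := by
        intro hc0
        rw [hc0] at hk0
        simp [PySem.Set.ofList] at hk0
      have hne' : hcell cell ≠ [] := by
        rw [hcc, Ne, PySem.List.sorted_eq_nil_iff]
        exact hnenil
      have hall' : ∀ y ∈ (hcell cell).map f, y = k0 := by
        intro y hy
        obtain ⟨e, he, rfl⟩ := List.mem_map.mp hy
        have : e ∈ cell := (hperm cell).mem_iff.mp he
        exact pv_mem_of_ofList_singleton hk0 (f e) (List.mem_map_of_mem this)
      have hset' : PySem.Set.ofList ((hcell cell).map f) = [k0] :=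
        pv_ofList_const _ k0 (by simpa using hne') hall'
      rw [pv_cellGroups_uniform f (hcell cell) k0 hset']
      have hss : PySem.List.sorted (PySem.List.sorted cell (fun x => x) false)
          (fun x => x) false = PySem.List.sorted cell (fun x => x) false :=
        PySem.List.sorted_sorted _ _
      rw [hcc, hss]
  rw [pv_flatMap_eq_map_of _ _ (fun c => c) hcellout, List.map_id']

theorem pv_loop_eq (fuel : Nat) (bases : List Int) (current : List (List Int)) :
    loopA fuel bases current = loopB fuel bases current := by
  induction fuel generalizing current with
  | zero => rfl
  | succ fuel ih =>
    simp only [loopA, loopB]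
    have hB : stepB bases current = (stepA bases current).1 := by
      rw [pv_stepA_eq, pv_stepB_eq]
    rw [hB]
    by_cases hc : (stepA bases current).1 = current
    · simp [hc]
    · have hc' : ((stepA bases current).1 == current) = false := by simp [hc]
      cases h2 : (stepA bases current).2 with
      | true => simp [hc', ih]
      | false =>
        simp only [hc', Bool.not_false, Bool.true_or, if_true, Bool.false_eq_true, if_false]
        cases fuel with
        | zero => rfl
        | succ fuel =>
          simp only [loopB, pv_fixpoint bases current h2, beq_self_eq_true, if_true]

-- ===== VERDICT (by name: the statement is the Claim_ definition above) =====
theorem refine_partition_py_spec : Claim_equal_refine_partition_py := by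
  intro n bases partition _ _
  unfold Spec_refine_partition_py refine_partition_py refine_partition_py_alt
  exact pv_loop_eq _ _ _
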